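-- pv_equiv track=rewrite | github.com/Srestrero/git_lab_ingesoft | Polinomios como arreglos,43-49.py | resta_2
-- ===== SOURCE A (Python) =====
-- def resta_2(a,b,c,d,e):
--     if (c==len(a)) and (d==len(b)):
--         return e
--     elif (c==len(a)):
--         e.append(b[d])
--         return resta_2(a,b,c,d+1,e)
--     elif (d==len(b)):
--         e.append(a[c])
--         return resta_2(a,b,c+1,d,e)
--     elif (a[c][1]>b[d][1]) :
--         e.append(a[c])
--         return resta_2(a,b,c+1,d,e)
--     elif (a[c][1]<b[d][1]) :
--         e.append(b[d])
--         return resta_2(a,b,c,d+1,e)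
--     elif (a[c][1]==b[d][1]) :
--         res=a[c][0]-b[d][0]
--         lista=[res,a[c][1]]
--         e.append(lista)
--         return resta_2(a,b,c+1,d+1,e)
-- ===== SOURCE B (Python) =====
-- def resta_2(a, b, c, d, e):
--     # Three staged loops instead of a five-way recursion: a merge loop
--     # while both sides are active, then two drain loops for the leftovers.
--     # Mutates e in place and returns it, like the original.
--     while c != len(a) and d != len(b):
--         pa, pb = a[c], b[d]
--         if pa[1] > pb[1]:
--             e.append(pa)
--             c += 1
--         elif pa[1] < pb[1]:
--             e.append(pb)
--             d += 1
--         else: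
--             e.append([pa[0] - pb[0], pa[1]])
--             c += 1
--             d += 1
--     while c != len(a):
--         e.append(a[c])
--         c += 1
--     while d != len(b):
--         e.append(b[d])
--         d += 1
--     return e
-- ===== Notes on version B (the rewrite author's own statement) =====
-- stated objective: simpler
-- what changed: Replaces the five-way tail recursion (one Python call frame per emitted term, RecursionError on long inputs) by three sequential iterative loops: a two-pointer merge loop while both sides are active, then one drain loop per leftover side.
-- outside the precondition, e.g. on resta_2([[1, 5], [9]], [[2, 5]], 0, 0, []): A returns [[-1, 5], [9]], B returns [[-1, 5], [9]]
import Mathlib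
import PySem

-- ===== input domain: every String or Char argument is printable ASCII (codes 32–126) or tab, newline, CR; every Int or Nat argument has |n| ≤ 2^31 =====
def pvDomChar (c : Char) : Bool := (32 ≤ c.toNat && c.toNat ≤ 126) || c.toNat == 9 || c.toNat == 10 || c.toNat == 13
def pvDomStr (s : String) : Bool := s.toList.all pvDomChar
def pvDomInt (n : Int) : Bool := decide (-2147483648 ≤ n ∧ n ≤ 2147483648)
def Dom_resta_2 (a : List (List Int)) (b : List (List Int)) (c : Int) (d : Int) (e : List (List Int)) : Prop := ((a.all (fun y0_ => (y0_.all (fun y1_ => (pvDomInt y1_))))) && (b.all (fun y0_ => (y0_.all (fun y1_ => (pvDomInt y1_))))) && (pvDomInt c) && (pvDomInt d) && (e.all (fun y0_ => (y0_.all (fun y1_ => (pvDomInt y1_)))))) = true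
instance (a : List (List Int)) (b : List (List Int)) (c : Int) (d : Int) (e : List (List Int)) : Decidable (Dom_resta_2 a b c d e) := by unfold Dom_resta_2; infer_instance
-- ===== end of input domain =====

-- B replaces A's five-way tail recursion by three sequential iterative loops (a merge
-- loop while both sides are active, then one drain loop per leftover side); objective:
-- simpler — no call frame per emitted term.  The equivalence proved here is about the
-- RETURN value: both Pythons mutate the argument list e in place and return it.
-- In both ports 'none' models a raised IndexError (excluded by Pre_), and the recursion
-- is driven by a fuel counter that provably never runs out before the Python terminates
-- or raises (fuel only makes the same computation total; it selects no alternative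
-- algorithm).

-- ===== PORT A =====
def resta_2AuxF (a : List (List Int)) (b : List (List Int)) : Nat → Int → Int → List (List Int) → Option (List (List Int))
  | 0, _, _, _ => none   -- unreachable for the fuel resta_2 supplies
  | fuel + 1, c, d, e =>
    if c = (a.length : Int) ∧ d = (b.length : Int) then
      some e
    else if c = (a.length : Int) then
      match PySem.List.pyGet? b d with
      | none => none
      | some r => resta_2AuxF a b fuel c (d + 1) (e ++ [r])
    else if d = (b.length : Int) then
      match PySem.List.pyGet? a c with
      | none => none
      | some r => resta_2AuxF a b fuel (c + 1) d (e ++ [r])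
    else
      match PySem.List.pyGet? a c, PySem.List.pyGet? b d with
      | some ra, some rb =>
        match PySem.List.pyGet? ra 1, PySem.List.pyGet? rb 1 with
        | some xa, some xb =>
          if xa > xb then resta_2AuxF a b fuel (c + 1) d (e ++ [ra])
          else if xa < xb then resta_2AuxF a b fuel c (d + 1) (e ++ [rb])
          else
            match PySem.List.pyGet? ra 0, PySem.List.pyGet? rb 0 with
            | some ca, some cb => resta_2AuxF a b fuel (c + 1) (d + 1) (e ++ [[ca - cb, xa]])
            | _, _ => none
        | _, _ => none
      | _, _ => none

def resta_2 (a : List (List Int)) (b : List (List Int)) (c : Int) (d : Int) (e : List (List Int)) : List (List Int) :=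
  (resta_2AuxF a b (a.length + b.length + c.natAbs + d.natAbs + 1) c d e).getD []

-- ===== PORT B =====
-- Source B's first loop: while c != len(a) and d != len(b); returns the final (c, d, e).
def bMergeF (a : List (List Int)) (b : List (List Int)) : Nat → Int → Int → List (List Int) → Option (Int × Int × List (List Int))
  | 0, _, _, _ => none   -- unreachable for the fuel resta_2_alt supplies
  | fuel + 1, c, d, acc =>
    if c ≠ (a.length : Int) ∧ d ≠ (b.length : Int) then
      match PySem.List.pyGet? a c, PySem.List.pyGet? b d with
      | some pa, some pb =>
        match PySem.List.pyGet? pa 1, PySem.List.pyGet? pb 1 with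
        | some xa, some xb =>
          if xa > xb then bMergeF a b fuel (c + 1) d (acc ++ [pa])
          else if xa < xb then bMergeF a b fuel c (d + 1) (acc ++ [pb])
          else
            match PySem.List.pyGet? pa 0, PySem.List.pyGet? pb 0 with
            | some ca, some cb => bMergeF a b fuel (c + 1) (d + 1) (acc ++ [[ca - cb, xa]])
            | _, _ => none
          | _, _ => none
      | _, _ => none
    else some (c, d, acc)

-- Source B's drain loops: while i != len(xs): e.append(xs[i]); i += 1  (used for a and for b).
def bDrainF (xs : List (List Int)) : Nat → Int → List (List Int) → Option (List (List Int))
  | 0, _, _ => none   -- unreachable for the fuel resta_2_alt supplies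
  | fuel + 1, i, acc =>
    if i ≠ (xs.length : Int) then
      match PySem.List.pyGet? xs i with
      | none => none
      | some r => bDrainF xs fuel (i + 1) (acc ++ [r])
    else some acc

def resta_2_alt (a : List (List Int)) (b : List (List Int)) (c : Int) (d : Int) (e : List (List Int)) : List (List Int) :=
  let fuel := a.length + b.length + c.natAbs + d.natAbs + 1
  (match bMergeF a b fuel c d e with
   | none => none
   | some (c', d', acc) =>
     match bDrainF a fuel c' acc with
     | none => none
     | some acc' => bDrainF b fuel d' acc').getD []

-- ===== PRECONDITION & SPEC =====
-- Pre_ = inputs on which the Python A returns (raises no IndexError): both indices within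
-- Python range [-len, len], and — unless one side starts exhausted — every row the merge can
-- read an exponent from has length ≥ 2.  This slightly over-approximates the raising set:
-- a short row behind terms that the merge never reaches (because the other side runs out
-- first) is excluded although A returns there; see the cite in claim.json.
def Pre_resta_2 (a : List (List Int)) (b : List (List Int)) (c : Int) (d : Int) (e : List (List Int)) : Prop :=
  -(a.length : Int) ≤ c ∧ c ≤ (a.length : Int) ∧ -(b.length : Int) ≤ d ∧ d ≤ (b.length : Int) ∧
  (c = (a.length : Int) ∨ d = (b.length : Int) ∨
    ((∀ x ∈ a.drop c.toNat, 2 ≤ x.length) ∧ (∀ x ∈ b.drop d.toNat, 2 ≤ x.length) ∧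
     (c < 0 → ∀ x ∈ a, 2 ≤ x.length) ∧ (d < 0 → ∀ x ∈ b, 2 ≤ x.length)))
instance (a : List (List Int)) (b : List (List Int)) (c : Int) (d : Int) (e : List (List Int)) : Decidable (Pre_resta_2 a b c d e) := by unfold Pre_resta_2; infer_instance

def pvWitness_resta_2 : List (List Int) × List (List Int) × Int × Int × List (List Int) :=
  ([[3, 2], [1, 0]], [[5, 1]], 0, 0, [])

def Spec_resta_2 (a : List (List Int)) (b : List (List Int)) (c : Int) (d : Int) (e : List (List Int)) (out : List (List Int)) : Prop := out = resta_2_alt a b c d e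
instance (a : List (List Int)) (b : List (List Int)) (c : Int) (d : Int) (e : List (List Int)) (out : List (List Int)) : Decidable (Spec_resta_2 a b c d e out) := by unfold Spec_resta_2; infer_instance

-- ===== CLAIM (what is proved, stated in full; the proofs are below) =====
def Claim_equal_resta_2 : Prop := ∀ (a : List (List Int)) (b : List (List Int)) (c : Int) (d : Int) (e : List (List Int)), Dom_resta_2 a b c d e → Pre_resta_2 a b c d e → Spec_resta_2 a b c d e (resta_2 a b c d e)

-- ===== LEMMAS AND PROOFS =====

theorem pvGetSome_lt {α : Type} {xs : List α} {i : Int} {x : α}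
    (h : PySem.List.pyGet? xs i = some x) : i < (xs.length : Int) := by
  by_contra hge
  have : PySem.List.pyGet? xs i = none := by
    rw [PySem.List.pyGet?_eq_none_iff, PySem.Raise.InRange]
    omega
  simp [this] at h

-- Once the a-side is exhausted (c = len a), A's recursion is exactly B's b-drain loop.
theorem auxF_drain_b (a : List (List Int)) (b : List (List Int)) :
    ∀ (f g : Nat) (d : Int) (e : List (List Int)),
      d ≤ (b.length : Int) →
      ((b.length : Int) - d).toNat < f → ((b.length : Int) - d).toNat < g →
      resta_2AuxF a b f (a.length : Int) d e = bDrainF b g d e := by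
  intro f
  induction f with
  | zero => intro g d e _ hf _; omega
  | succ f ih =>
    intro g d e hd hf hg
    cases g with
    | zero => omega
    | succ g =>
      rw [resta_2AuxF, bDrainF]
      by_cases hdb : d = (b.length : Int)
      · rw [if_pos ⟨rfl, hdb⟩, if_neg (by omega)]
      · rw [if_neg (by tauto), if_pos rfl, if_pos hdb]
        cases h : PySem.List.pyGet? b d with
        | none => rfl
        | some r =>
          have := pvGetSome_lt h
          exact ih g (d + 1) (e ++ [r]) (by omega) (by omega) (by omega)

-- Once the b-side is exhausted (d = len b), A's recursion is exactly B's a-drain loop.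
theorem auxF_drain_a (a : List (List Int)) (b : List (List Int)) :
    ∀ (f g : Nat) (c : Int) (e : List (List Int)),
      c ≤ (a.length : Int) →
      ((a.length : Int) - c).toNat < f → ((a.length : Int) - c).toNat < g →
      resta_2AuxF a b f c (b.length : Int) e = bDrainF a g c e := by
  intro f
  induction f with
  | zero => intro g c e _ hf _; omega
  | succ f ih =>
    intro g c e hc hf hg
    cases g with
    | zero => omega
    | succ g =>
      rw [resta_2AuxF, bDrainF]
      by_cases hca : c = (a.length : Int)
      · rw [if_pos ⟨hca, rfl⟩, if_neg (by omega)]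
      · rw [if_neg (by tauto), if_neg hca, if_pos rfl, if_pos hca]
        cases h : PySem.List.pyGet? a c with
        | none => rfl
        | some r =>
          have := pvGetSome_lt h
          exact ih g (c + 1) (e ++ [r]) (by omega) (by omega) (by omega)

-- A's recursion equals B's staged pipeline (merge loop, then the two drain loops),
-- for any two sufficient fuels, whenever both indices are ≤ the lengths (every state
-- reachable from a Pre_ input satisfies this).
theorem auxF_eq_staged (a : List (List Int)) (b : List (List Int)) :
    ∀ (f g H : Nat) (c d : Int) (e : List (List Int)),
      c ≤ (a.length : Int) → d ≤ (b.length : Int) →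
      ((a.length : Int) - c).toNat + ((b.length : Int) - d).toNat < f →
      ((a.length : Int) - c).toNat + ((b.length : Int) - d).toNat < g →
      ((a.length : Int) - c).toNat < H → ((b.length : Int) - d).toNat < H →
      resta_2AuxF a b f c d e =
        (match bMergeF a b g c d e with
         | none => none
         | some (c', d', acc) =>
           match bDrainF a H c' acc with
           | none => none
           | some acc' => bDrainF b H d' acc') := by
  intro f
  induction f with
  | zero => intro g H c d e _ _ hf _ _ _; omega
  | succ f ih =>
    intro g H c d e hc hd hf hg hHa hHb
    cases g with
    | zero => omega
    | succ g =>
      cases H with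
      | zero => omega
      | succ H =>
      by_cases hca : c = (a.length : Int)
      · -- merge loop does not run; a-drain returns at once; A = b-drain.
        rw [bMergeF, if_neg (by tauto)]
        have hdrA : bDrainF a (H + 1) c e = some e := by
          rw [bDrainF, if_neg (by omega)]
        dsimp only
        rw [hdrA]
        subst hca
        exact auxF_drain_b a b (f + 1) (H + 1) d e hd (by omega) (by omega)
      · by_cases hdb : d = (b.length : Int)
        · -- merge loop does not run; A = a-drain; the final b-drain is the identity.
          rw [bMergeF, if_neg (by tauto)]
          subst hdb
          rw [auxF_drain_a a b (f + 1) (H + 1) c e hc (by omega) (by omega)]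
          dsimp only
          cases hdr : bDrainF a (H + 1) c e with
          | none => rfl
          | some acc' =>
            dsimp only
            rw [bDrainF, if_neg (by omega)]
        · -- both sides active: one merge step on each side, then the ih.
          rw [resta_2AuxF, bMergeF,
              if_neg (show ¬(c = (a.length : Int) ∧ d = (b.length : Int)) by tauto),
              if_neg hca, if_neg hdb, if_pos ⟨hca, hdb⟩]
          cases ha : PySem.List.pyGet? a c with
          | none => rfl
          | some pa =>
            cases hb : PySem.List.pyGet? b d with
            | none => rfl
            | some pb =>
              have hca' := pvGetSome_lt ha
              have hdb' := pvGetSome_lt hb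
              dsimp only
              cases PySem.List.pyGet? pa 1 with
              | none => rfl
              | some xa =>
                cases PySem.List.pyGet? pb 1 with
                | none => rfl
                | some xb =>
                  dsimp only
                  by_cases hgt : xa > xb
                  · rw [if_pos hgt, if_pos hgt]
                    exact ih g (H + 1) (c + 1) d (e ++ [pa]) (by omega) hd (by omega) (by omega) (by omega) (by omega)
                  · by_cases hlt : xa < xb
                    · rw [if_neg hgt, if_pos hlt, if_neg hgt, if_pos hlt]
                      exact ih g (H + 1) c (d + 1) (e ++ [pb]) hc (by omega) (by omega) (by omega) (by omega) (by omega)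
                    · rw [if_neg hgt, if_neg hlt, if_neg hgt, if_neg hlt]
                      cases PySem.List.pyGet? pa 0 with
                      | none => rfl
                      | some ca =>
                        cases PySem.List.pyGet? pb 0 with
                        | none => rfl
                        | some cb =>
                          dsimp only
                          exact ih g (H + 1) (c + 1) (d + 1) (e ++ [[ca - cb, xa]]) (by omega) (by omega) (by omega) (by omega) (by omega) (by omega)

-- ===== VERDICT (by name: the statement is the Claim_ definition above) =====
theorem resta_2_spec : Claim_equal_resta_2 := by
  intro a b c d e _ hpre
  obtain ⟨h1, h2, h3, h4, -⟩ := hpre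
  unfold Spec_resta_2 resta_2 resta_2_alt
  rw [auxF_eq_staged a b (a.length + b.length + c.natAbs + d.natAbs + 1) (a.length + b.length + c.natAbs + d.natAbs + 1) (a.length + b.length + c.natAbs + d.natAbs + 1) c d e h2 h4 (by omega) (by omega) (by omega) (by omega)]
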